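-- pv_equiv track=rewrite | github.com/Pinungr/Pinaki_horoscope | app/engine/prediction_scorer.py | _deduplicate_sentences
-- ===== SOURCE A (Python) =====
-- from typing import Any, Dict, Iterable, List
--
-- def _split_sentences(text: str) -> List[str]:
--     text = " ".join(text.split())
--     if not text:
--         return []
--
--     parts: List[str] = []
--     current = []
--     for char in text:
--         current.append(char)
--         if char in ".!?;":
--             sentence = "".join(current).strip()
--             if sentence:
--                 parts.append(sentence)
--             current = []
--
--     trailing = "".join(current).strip()
--     if trailing:
--         parts.append(trailing)
--
--     return parts
--
-- def _deduplicate_sentences(texts: Iterable[str]) -> List[str]: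
--     seen = set()
--     unique_sentences: List[str] = []
--
--     for text in texts:
--         for sentence in _split_sentences(text):
--             normalized = sentence.strip().lower()
--             if not normalized or normalized in seen:
--                 continue
--             seen.add(normalized)
--             unique_sentences.append(sentence)
--
--     return unique_sentences
-- ===== SOURCE B (Python) =====
-- from typing import Iterable, List
--
-- def _deduplicate_sentences(texts: Iterable[str]) -> List[str]:
--     chosen = {}
--     for text in texts:
--         t = " ".join(text.split())
--         cuts = [0] + [i + 1 for i, c in enumerate(t) if c in ".!?;"]
--         for a, b in zip(cuts, cuts[1:] + [len(t)]):
--             s = t[a:b].strip()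
--             if s:
--                 chosen.setdefault(s.lower(), s)
--     return list(chosen.values())
-- ===== Notes on version B (the rewrite author's own statement) =====
-- stated objective: alternative
-- what changed: B replaces A's per-character accumulate-and-flush splitter by computing the delimiter cut positions once and slicing the normalised text, and replaces A's seen-set plus separate output list by a single insertion-ordered dict keyed by the lowercased sentence whose values are the result.
import Mathlib
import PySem

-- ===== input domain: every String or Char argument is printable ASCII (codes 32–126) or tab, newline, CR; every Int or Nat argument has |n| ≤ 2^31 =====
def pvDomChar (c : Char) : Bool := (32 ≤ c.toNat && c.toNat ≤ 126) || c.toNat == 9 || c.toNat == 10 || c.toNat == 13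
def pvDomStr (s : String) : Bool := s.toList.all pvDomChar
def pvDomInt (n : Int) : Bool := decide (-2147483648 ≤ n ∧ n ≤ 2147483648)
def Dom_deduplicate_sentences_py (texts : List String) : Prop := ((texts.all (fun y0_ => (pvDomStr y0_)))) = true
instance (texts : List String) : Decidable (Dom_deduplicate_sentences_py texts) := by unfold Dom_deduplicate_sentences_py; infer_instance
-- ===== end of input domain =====

-- B splits each whitespace-normalised text by computing the delimiter cut positions once and
-- slicing, and deduplicates with a single insertion-ordered dict keyed by the lowercased
-- sentence (its values are the result), instead of A's per-character accumulator flush plus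
-- a seen-set and a separate output list; objective: alternative (same asymptotic cost).

def pvDelims : List Char := ['.', '!', '?', ';']

-- ===== PORT A =====
-- port of _split_sentences
def split_sentences_py (text : String) : List String :=
  let t := PySem.Str.join " " (PySem.Str.split₀ text)
  if t = "" then []
  else
    let st := t.toList.foldl
      (fun (st : List String × List Char) c =>
        let cur := st.2 ++ [c]
        if c ∈ pvDelims then
          let sentence := PySem.Str.strip (String.ofList cur)
          (if sentence ≠ "" then st.1 ++ [sentence] else st.1, [])
        else (st.1, cur))
      ([], [])
    let trailing := PySem.Str.strip (String.ofList st.2)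
    if trailing ≠ "" then st.1 ++ [trailing] else st.1

def deduplicate_sentences_py (texts : List String) : List String :=
  (texts.foldl
    (fun (st : PySem.Set String × List String) text =>
      (split_sentences_py text).foldl
        (fun (st : PySem.Set String × List String) sentence =>
          let normalized := PySem.Str.lower (PySem.Str.strip sentence)
          if normalized = "" ∨ PySem.Set.contains st.1 normalized then st
          else (PySem.Set.add st.1 normalized, st.2 ++ [sentence]))
        st)
    (PySem.Set.empty, [])).2

-- ===== PORT B =====
def deduplicate_sentences_py_alt (texts : List String) : List String :=
  (texts.foldl
    (fun (chosen : PySem.Dict String String) text =>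
      let t := PySem.Str.join " " (PySem.Str.split₀ text)
      let cuts : List Int :=
        0 :: ((PySem.List.enumerate t.toList).filter (fun p => p.2 ∈ pvDelims)).map (fun p => p.1 + 1)
      let pairs := cuts.zip (PySem.List.slice cuts (some 1) none ++ [PySem.Str.len t])
      pairs.foldl
        (fun (chosen : PySem.Dict String String) ab =>
          let s := PySem.Str.strip (PySem.Str.slice t (some ab.1) (some ab.2))
          if s ≠ "" then chosen.setdefault (PySem.Str.lower s) s else chosen)
        chosen)
    PySem.Dict.empty).values

-- ===== PRECONDITION & SPEC =====
def Spec_deduplicate_sentences_py (texts : List String) (out : List String) : Prop := out = deduplicate_sentences_py_alt texts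
instance (texts : List String) (out : List String) : Decidable (Spec_deduplicate_sentences_py texts out) := by unfold Spec_deduplicate_sentences_py; infer_instance

-- ===== CLAIM (what is proved, stated in full; the proofs are below) =====
def Claim_equal_deduplicate_sentences_py : Prop := ∀ (texts : List String), Dom_deduplicate_sentences_py texts → Spec_deduplicate_sentences_py texts (deduplicate_sentences_py texts)

-- ===== LEMMAS AND PROOFS =====

-- reference splitter: finished (delimiter-terminated) raw chunks and the trailing remainder
def pvChunks (cur : List Char) : List Char → List (List Char) × List Char
  | [] => ([], cur)
  | c :: l =>
    if c ∈ pvDelims then ((cur ++ [c]) :: (pvChunks [] l).1, (pvChunks [] l).2)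
    else pvChunks (cur ++ [c]) l

def pvStrOf (k : List Char) : String := PySem.Str.strip (String.ofList k)

-- the common sentence stream of one whitespace-normalised text
def pvSents (t : List Char) : List String :=
  (((pvChunks [] t).1 ++ [(pvChunks [] t).2]).map pvStrOf).filter (fun s => s ≠ "")

theorem pvFoldA (l : List Char) (parts : List String) (cur : List Char) :
    l.foldl
      (fun (st : List String × List Char) c =>
        let cur := st.2 ++ [c]
        if c ∈ pvDelims then
          let sentence := PySem.Str.strip (String.ofList cur)
          (if sentence ≠ "" then st.1 ++ [sentence] else st.1, [])
        else (st.1, cur))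
      (parts, cur)
    = (parts ++ (((pvChunks cur l).1).map pvStrOf).filter (fun s => s ≠ ""), (pvChunks cur l).2) := by
  induction l generalizing parts cur with
  | nil => simp [pvChunks]
  | cons c l ih =>
    by_cases hc : c ∈ pvDelims
    · simp only [List.foldl_cons, pvChunks, if_pos hc, ih, List.map_cons, List.filter_cons, pvStrOf]
      split_ifs <;> simp_all
    · simp only [List.foldl_cons, pvChunks, if_neg hc, ih]

theorem pvSplitA (text : String) :
    split_sentences_py text = pvSents (PySem.Str.join " " (PySem.Str.split₀ text)).toList := by
  unfold split_sentences_py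
  generalize PySem.Str.join " " (PySem.Str.split₀ text) = t
  by_cases h : t = ""
  · subst h; rfl
  · simp only [if_neg h, pvFoldA, pvSents]
    by_cases hs : pvStrOf (pvChunks [] t.toList).2 ≠ ""
    · simp [pvStrOf] at hs
      simp [pvStrOf, hs, List.filter_append]
    · simp only [ne_eq, not_not] at hs
      simp only [pvStrOf] at hs
      simp [pvStrOf, hs, List.filter_append]

-- ---- B-side: cut positions and slices produce the same raw chunks ----

def pvCuts (t : List Char) : List Int :=
  0 :: ((PySem.List.enumerate t).filter (fun p => p.2 ∈ pvDelims)).map (fun p => p.1 + 1)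

def pvPairs (t : List Char) : List (Int × Int) :=
  (pvCuts t).zip ((pvCuts t).tail ++ [(t.length : Int)])

theorem pvChunks_no_delim (l : List Char) (h : ∀ c ∈ l, c ∉ pvDelims) (cur : List Char) :
    pvChunks cur l = ([], cur ++ l) := by
  induction l generalizing cur with
  | nil => simp [pvChunks]
  | cons c l ih =>
    have hc : c ∉ pvDelims := h c (by simp)
    rw [pvChunks, if_neg hc, ih (fun x hx => h x (by simp [hx]))]
    simp

theorem pvChunks_split (p : List Char) (d : Char) (r : List Char)
    (hp : ∀ c ∈ p, c ∉ pvDelims) (hd : d ∈ pvDelims) (cur : List Char) :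
    pvChunks cur (p ++ d :: r) = ((cur ++ p ++ [d]) :: (pvChunks [] r).1, (pvChunks [] r).2) := by
  induction p generalizing cur with
  | nil => simp [pvChunks, if_pos hd]
  | cons c p ih =>
    have hc : c ∉ pvDelims := hp c (by simp)
    rw [List.cons_append, pvChunks, if_neg hc, ih (fun x hx => hp x (by simp [hx]))]
    simp

theorem pvEnumShift (l : List Char) (s : Int) :
    PySem.List.enumerate l s = (PySem.List.enumerate l 0).map (fun p => (p.1 + s, p.2)) := by
  induction l generalizing s with
  | nil => simp [PySem.List.enumerate_nil]
  | cons c l ih =>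
    simp only [PySem.List.enumerate_cons, zero_add]
    rw [ih (s + 1), ih 1]
    simp only [List.map_cons, List.map_map, zero_add]
    congr 1
    apply List.map_congr_left; intro p _; simp; ring

theorem pvFilterEnumNil (l : List Char) (s : Int) (h : ∀ c ∈ l, c ∉ pvDelims) :
    (PySem.List.enumerate l s).filter (fun p => p.2 ∈ pvDelims) = [] := by
  rw [List.filter_eq_nil_iff]
  intro p hp
  rw [PySem.List.mem_enumerate_iff] at hp
  obtain ⟨k, hk, rfl⟩ := hp
  simpa using h _ (List.getElem_mem hk)

theorem pvCuts_nonneg (t : List Char) : ∀ x ∈ pvCuts t, 0 ≤ x := by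
  intro x hx
  rw [pvCuts, List.mem_cons] at hx
  rcases hx with rfl | hx
  · omega
  · rw [List.mem_map] at hx
    obtain ⟨p, hp, rfl⟩ := hx
    obtain ⟨hp, -⟩ := List.mem_filter.mp hp
    rw [PySem.List.mem_enumerate_iff] at hp
    obtain ⟨k, hk, rfl⟩ := hp
    simp only []
    omega

theorem pvChunksEq (n : Nat) : ∀ t : List Char, t.length ≤ n →
    (pvPairs t).map (fun ab => PySem.List.slice t (some ab.1) (some ab.2))
      = (pvChunks [] t).1 ++ [(pvChunks [] t).2] := by
  induction n with
  | zero =>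
    intro t ht
    have : t = [] := List.length_eq_zero_iff.mp (Nat.le_zero.mp ht)
    subst this; decide
  | succ n ih =>
    intro t ht
    by_cases hdw : List.dropWhile (fun c => !(decide (c ∈ pvDelims))) t = []
    · have hall : ∀ c ∈ t, c ∉ pvDelims := by
        intro c hc
        have := List.dropWhile_eq_nil_iff.mp hdw c hc
        simpa using this
      rw [pvChunks_no_delim t hall []]
      unfold pvPairs pvCuts
      rw [pvFilterEnumNil t 0 hall]
      simp only [List.map_nil, List.tail_cons, List.nil_append, List.zip_cons_cons,
        List.zip_nil_left, List.map_cons, List.map_nil]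
      rw [PySem.List.slice_toNat t le_rfl (Int.natCast_nonneg _)]
      simp
    · obtain ⟨d, r, hdr⟩ : ∃ d r, List.dropWhile (fun c => !(decide (c ∈ pvDelims))) t = d :: r := by
        rcases h : List.dropWhile (fun c => !(decide (c ∈ pvDelims))) t with _ | ⟨d, r⟩
        · exact absurd h hdw
        · exact ⟨d, r, rfl⟩
      have ht_eq : t = List.takeWhile (fun c => !(decide (c ∈ pvDelims))) t ++ d :: r := by
        rw [← hdr]; exact (List.takeWhile_append_dropWhile).symm
      set p := List.takeWhile (fun c => !(decide (c ∈ pvDelims))) t with hptw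
      have hd : d ∈ pvDelims := by
        have := List.head?_dropWhile_not (fun c => !(decide (c ∈ pvDelims))) t
        rw [hdr] at this
        simpa using this
      have hp : ∀ c ∈ p, c ∉ pvDelims := by
        intro c hc
        have := List.mem_takeWhile_imp hc
        simpa using this
      have hlenr : r.length ≤ n := by
        have := congrArg List.length ht_eq
        simp at this
        omega
      rw [ht_eq, pvChunks_split p d r hp hd []]
      unfold pvPairs pvCuts
      rw [PySem.List.enumerate_append, PySem.List.enumerate_cons]
      simp only [zero_add]
      rw [List.filter_append, pvFilterEnumNil p 0 hp, List.nil_append, List.filter_cons,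
        if_pos (show decide ((((p.length : Int)), d).2 ∈ pvDelims) = true by simpa using hd)]
      rw [pvEnumShift r ((p.length : Int) + 1)]
      have hfc : List.filter ((fun q : Int × Char => decide (q.2 ∈ pvDelims)) ∘
            fun q : Int × Char => (q.1 + ((p.length : Int) + 1), q.2)) (PySem.List.enumerate r)
          = List.filter (fun q : Int × Char => decide (q.2 ∈ pvDelims)) (PySem.List.enumerate r) := by
        apply List.filter_congr
        intro q _
        rfl
      have hcs : List.map ((fun q : Int × Char => q.1 + 1) ∘
            (fun q : Int × Char => (q.1 + ((p.length : Int) + 1), q.2)))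
            (List.filter (fun (q : Int × Char) => decide (q.2 ∈ pvDelims)) (PySem.List.enumerate r))
          = List.map (fun x => x + ((p.length : Int) + 1))
              (List.map (fun q : Int × Char => q.1 + 1)
                (List.filter (fun (q : Int × Char) => decide (q.2 ∈ pvDelims))
                  (PySem.List.enumerate r))) := by
        rw [List.map_map]
        apply List.map_congr_left
        intro q _
        simp
        ring
      rw [List.filter_map, hfc, List.map_cons, List.map_map, hcs]
      dsimp only
      generalize hcs2 : List.map (fun q : Int × Char => q.1 + 1)
        (List.filter (fun (q : Int × Char) => decide (q.2 ∈ pvDelims)) (PySem.List.enumerate r)) = cs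
      have hlen2 : ((p ++ d :: r).length : Int) = (r.length : Int) + ((p.length : Int) + 1) := by
        simp
        ring
      rw [hlen2, List.tail_cons, List.cons_append, List.zip_cons_cons, List.map_cons]
      have hhead : PySem.List.slice (p ++ d :: r) (some 0) (some ((p.length : Int) + 1)) = p ++ [d] := by
        rw [PySem.List.slice_toNat _ le_rfl (by positivity)]
        simp only [Int.toNat_zero, Nat.sub_zero, List.drop_zero]
        rw [show p ++ d :: r = (p ++ [d]) ++ r from by simp,
          show ((p.length : Int) + 1).toNat = (p ++ [d]).length from by simp,
          List.take_left]
      have htail : ((((p.length : Int) + 1) :: List.map (fun x => x + ((p.length : Int) + 1)) cs).zip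
            (List.map (fun x => x + ((p.length : Int) + 1)) cs ++ [(r.length : Int) + ((p.length : Int) + 1)]))
          = (pvPairs r).map
              (Prod.map (fun x => x + ((p.length : Int) + 1)) (fun x => x + ((p.length : Int) + 1))) := by
        unfold pvPairs pvCuts
        rw [hcs2, List.tail_cons, ← List.zip_map]
        simp
      have hmain : ∀ ab ∈ pvPairs r,
          ((fun ab : Int × Int => PySem.List.slice (p ++ d :: r) (some ab.1) (some ab.2)) ∘
            Prod.map (fun x => x + ((p.length : Int) + 1)) (fun x => x + ((p.length : Int) + 1))) ab
          = PySem.List.slice r (some ab.1) (some ab.2) := by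
        rintro ⟨a, b⟩ hab
        unfold pvPairs at hab
        obtain ⟨h1, h2⟩ := List.of_mem_zip hab
        have ha : 0 ≤ a := pvCuts_nonneg r a h1
        have hb : 0 ≤ b := by
          rcases List.mem_append.mp h2 with h | h
          · exact pvCuts_nonneg r b (List.mem_of_mem_tail h)
          · simp at h
            omega
        show PySem.List.slice (p ++ d :: r) (some (a + ((p.length : Int) + 1)))
            (some (b + ((p.length : Int) + 1))) = _
        rw [PySem.List.slice_toNat _ (by omega) (by omega), PySem.List.slice_toNat _ ha hb,
          show p ++ d :: r = (p ++ [d]) ++ r from by simp, List.drop_append,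
          List.drop_eq_nil_of_le (show (p ++ [d]).length ≤ (a + ((p.length : Int) + 1)).toNat by simp; omega),
          List.nil_append,
          show (b + ((p.length : Int) + 1)).toNat - (a + ((p.length : Int) + 1)).toNat
            = b.toNat - a.toNat from by omega,
          show (a + ((p.length : Int) + 1)).toNat - (p ++ [d]).length = a.toNat from by simp; omega]
      rw [hhead, htail, List.map_map, List.map_congr_left hmain, ih r hlenr]
      simp

-- string-level: one text's B-sentences equal the common stream
theorem pvSentsB (t : String) :
    ((pvPairs t.toList).map
        (fun ab => PySem.Str.strip (PySem.Str.slice t (some ab.1) (some ab.2)))).filter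
      (fun s => s ≠ "")
    = pvSents t.toList := by
  have hmap : ∀ ab : Int × Int,
      PySem.Str.strip (PySem.Str.slice t (some ab.1) (some ab.2))
        = pvStrOf (PySem.List.slice t.toList (some ab.1) (some ab.2)) := by
    intro ab
    unfold pvStrOf
    congr 1
  rw [List.map_congr_left (fun ab _ => hmap ab)]
  have hsplit : (pvPairs t.toList).map
        (fun ab => pvStrOf (PySem.List.slice t.toList (some ab.1) (some ab.2)))
      = ((pvPairs t.toList).map
          (fun ab => PySem.List.slice t.toList (some ab.1) (some ab.2))).map pvStrOf := by
    rw [List.map_map]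
    rfl
  rw [hsplit, pvChunksEq t.toList.length t.toList le_rfl]
  rfl

-- strip is idempotent
theorem pvDropWhilePrefix (p : Char → Bool) (u v : List Char) (hpre : v <+: u)
    (hu : List.dropWhile p u = u) : List.dropWhile p v = v := by
  rw [List.dropWhile_eq_self_iff] at hu ⊢
  intro hl
  have hlen : v.length ≤ u.length := hpre.length_le
  rw [hpre.getElem (by omega)]
  exact hu (by omega)

theorem pvCharsStripIdem (l : List Char) :
    PySem.Chars.strip (PySem.Chars.strip l) = PySem.Chars.strip l := by
  unfold PySem.Chars.strip PySem.Chars.rstrip PySem.Chars.lstrip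
  set sp := PySem.Chars.isspace with hsp
  set u := List.dropWhile sp l with hu
  set v := (List.dropWhile sp u.reverse).reverse with hv
  have hu1 : List.dropWhile sp u = u := by rw [hu]; exact List.dropWhile_idempotent sp l
  have hvpre : v <+: u := by
    rw [← List.reverse_suffix, hv, List.reverse_reverse]
    exact List.dropWhile_suffix sp
  have hv1 : List.dropWhile sp v = v := pvDropWhilePrefix sp u v hvpre hu1
  rw [hv1, hv, List.reverse_reverse, List.dropWhile_idempotent]

theorem pvStripIdem (s : String) : PySem.Str.strip (PySem.Str.strip s) = PySem.Str.strip s := by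
  rw [← String.toList_inj, PySem.Str.toList_strip, PySem.Str.toList_strip]
  exact pvCharsStripIdem _

theorem pvSents_prop (t : List Char) : ∀ s ∈ pvSents t, PySem.Str.strip s = s ∧ s ≠ "" := by
  intro s hs
  unfold pvSents at hs
  rw [List.mem_filter] at hs
  obtain ⟨hm, hne⟩ := hs
  rw [List.mem_map] at hm
  obtain ⟨k, _, rfl⟩ := hm
  exact ⟨pvStripIdem _, by simpa using hne⟩

theorem pvLowerNe (s : String) (h : s ≠ "") : PySem.Str.lower s ≠ "" := by
  intro hc
  apply h
  rw [← String.toList_inj] at hc ⊢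
  have := congrArg List.length hc
  simpa [PySem.Str.toList_lower, PySem.Chars.lower] using this

theorem pvContainsEq (d : PySem.Dict String String) (n : String) :
    PySem.Set.contains d.keys n = d.contains n := by
  simp only [PySem.Set.contains, PySem.Dict.contains, PySem.Dict.keys]
  rw [List.contains_eq_any_beq]
  simp [List.any_map, Function.comp_def, BEq.comm]

theorem pvDedupFold (L : List String) (hL : ∀ s ∈ L, PySem.Str.strip s = s ∧ s ≠ "")
    (d : PySem.Dict String String) :
    L.foldl
      (fun (st : PySem.Set String × List String) sentence =>
        let normalized := PySem.Str.lower (PySem.Str.strip sentence)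
        if normalized = "" ∨ PySem.Set.contains st.1 normalized then st
        else (PySem.Set.add st.1 normalized, st.2 ++ [sentence]))
      (d.keys, d.values)
    = ((L.foldl (fun d s => d.setdefault (PySem.Str.lower s) s) d).keys,
       (L.foldl (fun d s => d.setdefault (PySem.Str.lower s) s) d).values) := by
  induction L generalizing d with
  | nil => rfl
  | cons s L ih =>
    obtain ⟨hstrip, hne⟩ := hL s (by simp)
    have hLn : ∀ x ∈ L, PySem.Str.strip x = x ∧ x ≠ "" := fun x hx => hL x (by simp [hx])
    simp only [List.foldl_cons, hstrip]
    have hn : PySem.Str.lower s ≠ "" := pvLowerNe s hne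
    by_cases hcont : d.contains (PySem.Str.lower s) = true
    · rw [if_pos (by rw [pvContainsEq]; exact Or.inr hcont),
        PySem.Dict.setdefault_of_contains d s hcont]
      exact ih hLn d
    · rw [if_neg (by rw [pvContainsEq]; simp [hn, hcont])]
      have hsd : d.setdefault (PySem.Str.lower s) s
          = PySem.Dict.mk (d.items ++ [(PySem.Str.lower s, s)]) := by
        simp [PySem.Dict.setdefault, Bool.of_not_eq_true hcont]
      have hkeys : (d.setdefault (PySem.Str.lower s) s).keys = d.keys ++ [PySem.Str.lower s] := by
        simp [hsd, PySem.Dict.keys]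
      have hvals : (d.setdefault (PySem.Str.lower s) s).values = d.values ++ [s] := by
        simp [hsd, PySem.Dict.values]
      have hadd : PySem.Set.add d.keys (PySem.Str.lower s) = d.keys ++ [PySem.Str.lower s] := by
        simp only [PySem.Set.add, pvContainsEq, Bool.of_not_eq_true hcont]
        simp
      rw [hadd, ← hkeys, ← hvals]
      exact ih hLn _

theorem pvFoldIte {α : Type} (g : α → String) (l : List α) (d : PySem.Dict String String) :
    l.foldl
      (fun (chosen : PySem.Dict String String) x =>
        if g x ≠ "" then chosen.setdefault (PySem.Str.lower (g x)) (g x) else chosen) d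
    = ((l.map g).filter (fun s => s ≠ "")).foldl
        (fun d s => d.setdefault (PySem.Str.lower s) s) d := by
  induction l generalizing d with
  | nil => rfl
  | cons x l ih =>
    by_cases h : g x = ""
    · rw [List.foldl_cons, if_neg (by simp [h]), List.map_cons, List.filter_cons,
        if_neg (by simp [h])]
      exact ih d
    · rw [List.foldl_cons, if_pos h, List.map_cons, List.filter_cons, if_pos (by simp [h]),
        List.foldl_cons]
      exact ih _

-- reshape B's inner loop into a fold of setdefault over the sentence stream
theorem pvInnerB (t : String) (d : PySem.Dict String String) :
    (pvPairs t.toList).foldl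
      (fun (chosen : PySem.Dict String String) ab =>
        let s := PySem.Str.strip (PySem.Str.slice t (some ab.1) (some ab.2))
        if s ≠ "" then chosen.setdefault (PySem.Str.lower s) s else chosen)
      d
    = (pvSents t.toList).foldl (fun d s => d.setdefault (PySem.Str.lower s) s) d := by
  rw [← pvSentsB]
  have hzeta :
      (fun (chosen : PySem.Dict String String) (ab : Int × Int) =>
        let s := PySem.Str.strip (PySem.Str.slice t (some ab.1) (some ab.2))
        if s ≠ "" then chosen.setdefault (PySem.Str.lower s) s else chosen)
      = (fun (chosen : PySem.Dict String String) ab =>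
          if PySem.Str.strip (PySem.Str.slice t (some ab.1) (some ab.2)) ≠ "" then
            chosen.setdefault
              (PySem.Str.lower (PySem.Str.strip (PySem.Str.slice t (some ab.1) (some ab.2))))
              (PySem.Str.strip (PySem.Str.slice t (some ab.1) (some ab.2)))
          else chosen) := rfl
  rw [hzeta, pvFoldIte]

theorem pvStepB (t : String) (d : PySem.Dict String String) :
    (let cuts : List Int :=
        0 :: ((PySem.List.enumerate t.toList).filter (fun p => p.2 ∈ pvDelims)).map (fun p => p.1 + 1)
      let pairs := cuts.zip (PySem.List.slice cuts (some 1) none ++ [PySem.Str.len t])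
      pairs.foldl
        (fun (chosen : PySem.Dict String String) ab =>
          let s := PySem.Str.strip (PySem.Str.slice t (some ab.1) (some ab.2))
          if s ≠ "" then chosen.setdefault (PySem.Str.lower s) s else chosen)
        d)
    = (pvSents t.toList).foldl (fun d s => d.setdefault (PySem.Str.lower s) s) d := by
  have h1 :
      (0 :: ((PySem.List.enumerate t.toList).filter (fun p => p.2 ∈ pvDelims)).map (fun p => p.1 + 1)).zip
        (PySem.List.slice
            (0 :: ((PySem.List.enumerate t.toList).filter (fun p => p.2 ∈ pvDelims)).map (fun p => p.1 + 1))
            (some 1) none ++ [PySem.Str.len t])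
        = pvPairs t.toList := by
    rw [PySem.List.slice_from_one, PySem.Str.len_eq]; rfl
  exact (congrArg
    (fun L => L.foldl
      (fun (chosen : PySem.Dict String String) (ab : Int × Int) =>
        let s := PySem.Str.strip (PySem.Str.slice t (some ab.1) (some ab.2))
        if s ≠ "" then chosen.setdefault (PySem.Str.lower s) s else chosen)
      d) h1).trans (pvInnerB t d)

theorem pvOuter (texts : List String) (d : PySem.Dict String String) :
    texts.foldl
      (fun (st : PySem.Set String × List String) text =>
        (split_sentences_py text).foldl
          (fun (st : PySem.Set String × List String) sentence =>
            let normalized := PySem.Str.lower (PySem.Str.strip sentence)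
            if normalized = "" ∨ PySem.Set.contains st.1 normalized then st
            else (PySem.Set.add st.1 normalized, st.2 ++ [sentence]))
          st)
      (d.keys, d.values)
    = ((texts.foldl
          (fun (chosen : PySem.Dict String String) text =>
            let t := PySem.Str.join " " (PySem.Str.split₀ text)
            let cuts : List Int :=
              0 :: ((PySem.List.enumerate t.toList).filter (fun p => p.2 ∈ pvDelims)).map (fun p => p.1 + 1)
            let pairs := cuts.zip (PySem.List.slice cuts (some 1) none ++ [PySem.Str.len t])
            pairs.foldl
              (fun (chosen : PySem.Dict String String) ab =>
                let s := PySem.Str.strip (PySem.Str.slice t (some ab.1) (some ab.2))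
                if s ≠ "" then chosen.setdefault (PySem.Str.lower s) s else chosen)
              chosen)
          d).keys,
       (texts.foldl
          (fun (chosen : PySem.Dict String String) text =>
            let t := PySem.Str.join " " (PySem.Str.split₀ text)
            let cuts : List Int :=
              0 :: ((PySem.List.enumerate t.toList).filter (fun p => p.2 ∈ pvDelims)).map (fun p => p.1 + 1)
            let pairs := cuts.zip (PySem.List.slice cuts (some 1) none ++ [PySem.Str.len t])
            pairs.foldl
              (fun (chosen : PySem.Dict String String) ab =>
                let s := PySem.Str.strip (PySem.Str.slice t (some ab.1) (some ab.2))
                if s ≠ "" then chosen.setdefault (PySem.Str.lower s) s else chosen)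
              chosen)
          d).values) := by
  induction texts generalizing d with
  | nil => rfl
  | cons text texts ih =>
    rw [List.foldl_cons, List.foldl_cons, pvSplitA text,
      pvDedupFold _ (pvSents_prop _) d]
    have hb := pvStepB (PySem.Str.join " " (PySem.Str.split₀ text)) d
    exact (ih _).trans (by rw [hb])

-- ===== VERDICT (by name: the statement is the Claim_ definition above) =====
theorem deduplicate_sentences_py_spec : Claim_equal_deduplicate_sentences_py := by
  intro texts _
  unfold Spec_deduplicate_sentences_py deduplicate_sentences_py deduplicate_sentences_py_alt
  exact congrArg Prod.snd (pvOuter texts PySem.Dict.empty)
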